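-- pv_equiv track=rewrite | github.com/Ibraheem-A/sim-time-analysis | myutils/logparseutil.py | extract_vehicle_blocks
-- ===== SOURCE A (Python) =====
-- def extract_vehicle_blocks(lines: list) -> list:
--     blocks = []
--     current_block = []
--     for line in lines:
--         if "Costs per service time is not set" in line:
--             if current_block:
--                 blocks.append(current_block)
--             current_block = [line]
--         elif current_block:
--             current_block.append(line)
--     if current_block:
--         blocks.append(current_block)
--     return blocks
-- ===== SOURCE B (Python) =====
-- def extract_vehicle_blocks(lines: list) -> list:
--     MARKER = "Costs per service time is not set"
--     idx = [i for i, line in enumerate(lines) if MARKER in line]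
--     if not idx:
--         return []
--     return [lines[a:b] for a, b in zip(idx, idx[1:])] + [lines[idx[-1]:]]
-- ===== Notes on version B (the rewrite author's own statement) =====
-- stated objective: alternative
-- what changed: B first builds the table of indices of marker lines, then produces each block by slicing the input between consecutive marker indices (plus the final suffix slice), replacing A's stateful current-block/flush accumulator loop with an index-table-then-slice two-phase construction.
import Mathlib
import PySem

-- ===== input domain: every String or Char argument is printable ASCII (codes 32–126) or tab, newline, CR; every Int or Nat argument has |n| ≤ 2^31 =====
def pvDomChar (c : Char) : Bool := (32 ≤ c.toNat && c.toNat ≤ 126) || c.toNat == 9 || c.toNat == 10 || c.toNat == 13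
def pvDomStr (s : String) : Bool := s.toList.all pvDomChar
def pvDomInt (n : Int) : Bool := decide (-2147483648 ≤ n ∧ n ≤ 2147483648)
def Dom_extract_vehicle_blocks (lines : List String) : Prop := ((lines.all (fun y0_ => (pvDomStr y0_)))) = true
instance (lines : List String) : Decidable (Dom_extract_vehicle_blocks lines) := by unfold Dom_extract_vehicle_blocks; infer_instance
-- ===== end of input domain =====

-- B builds the table of marker-line indices first, then slices the input between
-- consecutive indices (plus the final suffix slice), instead of A's stateful
-- current-block/flush accumulator loop. Objective: alternative (same cost).


def pvMarker : String := "Costs per service time is not set"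

-- ===== PORT A =====
-- state: (blocks, current_block); the for-loop body of A
def aStep (st : List (List String) × List String) (line : String) :
    List (List String) × List String :=
  if PySem.Str.isIn pvMarker line then
    (if st.2 ≠ [] then (st.1 ++ [st.2], [line]) else (st.1, [line]))
  else if st.2 ≠ [] then (st.1, st.2 ++ [line])
  else st

def extract_vehicle_blocks (lines : List String) : List (List String) :=
  let st := lines.foldl aStep ([], [])
  if st.2 ≠ [] then st.1 ++ [st.2] else st.1

-- ===== PORT B =====
-- idx = [i for i, line in enumerate(lines) if MARKER in line]; then slice between
-- consecutive indices and append the final suffix slice (Source B, line for line).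
def extract_vehicle_blocks_alt (lines : List String) : List (List String) :=
  let idx := ((PySem.List.enumerate lines 0).filter
      (fun p => PySem.Str.isIn pvMarker p.2)).map Prod.fst
  match idx with
  | [] => []
  | _ :: _ =>
      ((idx.zip (PySem.List.slice idx (some 1) none)).map
        (fun p => PySem.List.slice lines (some p.1) (some p.2))) ++
      [PySem.List.slice lines (some (idx.getLastD 0)) none]

-- ===== PRECONDITION & SPEC =====
def Spec_extract_vehicle_blocks (lines : List String) (out : List (List String)) : Prop := out = extract_vehicle_blocks_alt lines
instance (lines : List String) (out : List (List String)) : Decidable (Spec_extract_vehicle_blocks lines out) := by unfold Spec_extract_vehicle_blocks; infer_instance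

-- ===== CLAIM (what is proved, stated in full; the proofs are below) =====
def Claim_equal_extract_vehicle_blocks : Prop := ∀ (lines : List String), Dom_extract_vehicle_blocks lines → Spec_extract_vehicle_blocks lines (extract_vehicle_blocks lines)

-- ===== LEMMAS AND PROOFS =====

-- reference recursion: (blocks starting at markers, pending lines before the first marker)
def specRec : List String → List (List String) × List String
  | [] => ([], [])
  | l :: rest =>
    let p := specRec rest
    if PySem.Str.isIn pvMarker l then ((l :: p.2) :: p.1, [])
    else (p.1, l :: p.2)

def aFinish (st : List (List String) × List String) : List (List String) :=
  if st.2 ≠ [] then st.1 ++ [st.2] else st.1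

theorem aFold_spec (lines : List String) (blocks : List (List String)) (cur : List String) :
    aFinish (lines.foldl aStep (blocks, cur)) =
      blocks ++ (if cur = [] then (specRec lines).1
                 else (cur ++ (specRec lines).2) :: (specRec lines).1) := by
  induction lines generalizing blocks cur with
  | nil => by_cases h : cur = [] <;> simp [aFinish, specRec, h]
  | cons l rest ih =>
    simp only [List.foldl_cons, specRec, aStep, PySem.Str.isIn]
    by_cases hm : PySem.Chars.isIn pvMarker.toList l.toList = true <;> by_cases hc : cur = [] <;>
      simp [hm, hc, ih]

-- natural-number marker index table (proof-side image of B's idx list)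
def mIdx : List String → List Nat
  | [] => []
  | l :: rest =>
    if PySem.Str.isIn pvMarker l then 0 :: (mIdx rest).map (· + 1)
    else (mIdx rest).map (· + 1)

theorem idx_eq_mIdx (lines : List String) (s : Int) :
    ((PySem.List.enumerate lines s).filter
        (fun p => PySem.Str.isIn pvMarker p.2)).map Prod.fst
      = (mIdx lines).map (fun k : Nat => s + (k : Int)) := by
  induction lines generalizing s with
  | nil => simp [PySem.List.enumerate_nil, mIdx]
  | cons l rest ih =>
    have key : ((mIdx rest).map (· + 1)).map (fun k : Nat => s + (k : Int))
        = (mIdx rest).map (fun k : Nat => (s + 1) + (k : Int)) := by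
      rw [List.map_map]
      exact List.map_congr_left (fun k _ => by simp [Function.comp]; ring)
    rw [PySem.List.enumerate_cons]
    simp only [mIdx, PySem.Str.isIn]
    simp only [PySem.Str.isIn] at ih
    by_cases hm : PySem.Chars.isIn pvMarker.toList l.toList = true <;>
      simp [hm, ih, key]

theorem getLastD_map_succ (i : Nat) (I : List Nat) :
    ((i :: I).map (· + 1)).getLastD 0 = (i :: I).getLastD 0 + 1 := by
  rw [List.getLastD_eq_getLast?, List.getLastD_eq_getLast?, List.getLast?_map]
  cases h : (i :: I : List Nat).getLast? with
  | none => simp at h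
  | some x => simp

-- proof-side take/drop form of B's slice construction
def gNat (lines : List String) (I : List Nat) : List (List String) :=
  match I with
  | [] => []
  | _ :: _ =>
      ((I.zip I.tail).map (fun p => (lines.drop p.1).take (p.2 - p.1))) ++
      [lines.drop (I.getLastD 0)]

theorem alt_eq_gNat (lines : List String) :
    extract_vehicle_blocks_alt lines = gNat lines (mIdx lines) := by
  unfold extract_vehicle_blocks_alt
  have hmap : ((PySem.List.enumerate lines 0).filter
        (fun p => PySem.Str.isIn pvMarker p.2)).map Prod.fst
      = (mIdx lines).map (fun k : Nat => (k : Int)) := by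
    rw [idx_eq_mIdx lines 0]
    exact List.map_congr_left (fun k _ => by ring)
  rw [hmap]
  cases hI : mIdx lines with
  | nil => simp [gNat]
  | cons i I' =>
    simp only [List.map_cons, PySem.List.slice_from_one, gNat, List.tail_cons]
    congr 1
    · rw [show ((i : Int) :: I'.map (fun k : Nat => (k : Int)))
            = (i :: I').map (fun k : Nat => (k : Int)) from rfl,
        show I'.map (fun k : Nat => (k : Int)) = (i :: I').tail.map (fun k : Nat => (k : Int)) from rfl,
        List.zip_map, List.map_map]
      exact List.map_congr_left (fun p _ => by
        simp only [Function.comp_def, Prod.map]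
        rw [PySem.List.slice_natCast])
    · have : (((i : Int) :: I'.map (fun k : Nat => (k : Int)))).getLastD 0
          = (((i :: I').getLastD 0 : Nat) : Int) := by
        rw [show ((i : Int) :: I'.map (fun k : Nat => (k : Int)))
              = (i :: I').map (fun k : Nat => (k : Int)) from rfl,
          List.getLastD_eq_getLast?, List.getLast?_map, List.getLastD_eq_getLast?]
        cases h : (i :: I' : List Nat).getLast? with
        | none => simp at h
        | some x => simp
      rw [this, PySem.List.slice_from_natCast]

-- inserting a non-marker head line shifts every index by one and changes nothing
theorem gNat_shift (l : String) (lines : List String) (I : List Nat) :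
    gNat (l :: lines) (I.map (· + 1)) = gNat lines I := by
  cases I with
  | nil => simp [gNat]
  | cons i I' =>
    simp only [gNat, List.map_cons, List.tail_cons]
    congr 1
    · rw [show ((i + 1) :: I'.map (· + 1)) = (i :: I').map (· + 1) from rfl,
        show I'.map (· + 1) = (i :: I').tail.map (· + 1) from rfl,
        List.zip_map, List.map_map]
      exact List.map_congr_left (fun p _ => by
        simp only [Function.comp_def, Prod.map, List.drop_succ_cons]
        congr 1
        omega)
    · rw [show ((i + 1) :: I'.map (· + 1)) = (i :: I').map (· + 1) from rfl,
        getLastD_map_succ]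
      simp

theorem gNat_eq_specRec (lines : List String) :
    gNat lines (mIdx lines) = (specRec lines).1 ∧
      (specRec lines).2 = lines.take ((mIdx lines).headD lines.length) := by
  induction lines with
  | nil => simp [gNat, mIdx, specRec]
  | cons l rest ih =>
    obtain ⟨ih1, ih2⟩ := ih
    simp only [specRec, mIdx, PySem.Str.isIn]
    by_cases hm : PySem.Chars.isIn pvMarker.toList l.toList = true
    · refine ⟨?_, by simp [hm]⟩
      simp only [hm, if_pos]
      cases hI : mIdx rest with
      | nil =>
        have h1 : (specRec rest).1 = [] := by rw [← ih1, hI]; simp [gNat]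
        have h2 : (specRec rest).2 = rest := by rw [ih2, hI]; simp
        simp [gNat, h1, h2]
      | cons j J =>
        have h2 : (specRec rest).2 = rest.take j := by rw [ih2, hI]; simp
        have hg : gNat (l :: rest) ((mIdx rest).map (· + 1)) = (specRec rest).1 := by
          rw [gNat_shift, ih1]
        rw [hI] at hg
        simp only [List.map_cons] at hg
        simp only [gNat, List.tail_cons, List.zip_cons_cons,
          List.map_cons, List.drop_zero] at hg ⊢
        rw [← hg]
        simp only [List.cons_append]
        congr 2
        · simp only [Nat.sub_zero, List.take_succ_cons, h2]
    · replace hm : PySem.Chars.isIn pvMarker.toList l.toList = false := by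
        cases h : PySem.Chars.isIn pvMarker.toList l.toList
        · rfl
        · exact absurd h hm
      refine ⟨?_, ?_⟩
      · simp only [hm, Bool.false_eq_true, if_false]
        rw [gNat_shift, ih1]
      · simp only [hm, Bool.false_eq_true, if_false]
        cases hI : mIdx rest with
        | nil =>
          have h2 : (specRec rest).2 = rest := by rw [ih2, hI]; simp
          simp [h2]
        | cons j J =>
          have h2 : (specRec rest).2 = rest.take j := by rw [ih2, hI]; simp
          simp [h2]

-- ===== VERDICT (by name: the statement is the Claim_ definition above) =====
theorem extract_vehicle_blocks_spec : Claim_equal_extract_vehicle_blocks := by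
  intro lines _
  show extract_vehicle_blocks lines = extract_vehicle_blocks_alt lines
  unfold extract_vehicle_blocks
  rw [alt_eq_gNat, (gNat_eq_specRec lines).1]
  simpa [aFinish] using aFold_spec lines [] []
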